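-- pv_equiv track=rewrite | github.com/tomkennedy22/2021-Advent | day-06/solution-6.1.py | model_fish
-- ===== SOURCE A (Python) =====
-- def model_fish(fish):
--     for i, x in enumerate(fish):
--         if x > 0:
--             fish[i] -= 1
--         else:
--             fish[i] += 6
--             fish.append(9)
--     return fish
-- ===== SOURCE B (Python) =====
-- def model_fish(fish):
--     born = sum(1 for x in fish if x <= 0)
--     fish[:] = [x - 1 if x > 0 else x + 6 for x in fish] + [8] * born
--     return fish
-- ===== Notes on version B (the rewrite author's own statement) =====
-- stated objective: simpler
-- what changed: Replaces A's index loop that mutates the list while iterating (each newborn 9 is revisited and decremented to 8 in the same pass) by a single in-place slice assignment: a map over the original elements plus a counted block of 8s appended at the end.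
import Mathlib
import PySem

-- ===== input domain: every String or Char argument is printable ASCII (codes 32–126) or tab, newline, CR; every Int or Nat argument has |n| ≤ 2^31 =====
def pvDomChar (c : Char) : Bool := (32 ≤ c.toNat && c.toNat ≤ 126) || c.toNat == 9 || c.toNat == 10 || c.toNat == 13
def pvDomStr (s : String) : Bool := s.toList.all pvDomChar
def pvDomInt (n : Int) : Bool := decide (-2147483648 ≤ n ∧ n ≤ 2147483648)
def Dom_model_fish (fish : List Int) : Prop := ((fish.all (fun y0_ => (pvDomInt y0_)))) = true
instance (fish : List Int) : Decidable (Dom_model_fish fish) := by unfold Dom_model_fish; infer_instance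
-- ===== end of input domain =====

-- B replaces A's loop that mutates the list during iteration by one map plus a counted
-- extend of 8s assigned in place (same object mutated; equivalence proved on the return value).


-- ===== PORT A =====
-- A iterates over the list while appending to it; Python's list iterator re-checks the
-- length each step, so the loop also visits the appended 9s (decrementing them to 8).
-- Ported as recursion on the current list and index, stopping when the index reaches
-- the current length — exactly Python's iteration over a growing list.
def modelFishLoopA (fish : List Int) (i : Nat) : List Int :=
  if h : i < fish.length then
    let x := fish[i]
    if x > 0 then
      modelFishLoopA (fish.set i (x - 1)) (i + 1)
    else
      modelFishLoopA (fish.set i (x + 6) ++ [9]) (i + 1)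
  else
    fish
termination_by (fish.length - i) + (fish.drop i).countP (fun x => decide (x ≤ 0))
decreasing_by
  · have hd : fish.drop i = fish[i] :: fish.drop (i + 1) := List.drop_eq_getElem_cons h
    have h1 : (fish.set i (fish[i] - 1)).drop (i + 1) = fish.drop (i + 1) := by
      rw [List.drop_set]; simp
    have h2 : (fish.drop i).countP (fun x => decide (x ≤ 0))
        = (fish.drop (i + 1)).countP (fun x => decide (x ≤ 0)) := by
      rw [hd, List.countP_cons]; simp; omega
    simp only [List.length_set, h1, h2]; omega
  · have hd : fish.drop i = fish[i] :: fish.drop (i + 1) := List.drop_eq_getElem_cons h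
    have h1 : (fish.set i (fish[i] + 6) ++ [9]).drop (i + 1)
        = fish.drop (i + 1) ++ [9] := by
      rw [List.drop_append_of_le_length (by simp; omega), List.drop_set]; simp
    have h2 : (fish.drop i).countP (fun x => decide (x ≤ 0))
        = (fish.drop (i + 1)).countP (fun x => decide (x ≤ 0)) + 1 := by
      rw [hd, List.countP_cons]; simp; omega
    have h3 : (fish.drop (i + 1) ++ [9]).countP (fun x => decide (x ≤ 0))
        = (fish.drop (i + 1)).countP (fun x => decide (x ≤ 0)) := by
      rw [List.countP_append]; simp
    simp only [List.length_append, List.length_set, List.length_singleton, h1, h3]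
    omega

def model_fish (fish : List Int) : List Int := modelFishLoopA fish 0

-- ===== PORT B =====
-- Source B: born = count of x ≤ 0; fish[:] = [x-1 if x>0 else x+6 for x in fish] + [8]*born
def model_fish_alt (fish : List Int) : List Int :=
  (fish.map (fun x => if x > 0 then x - 1 else x + 6))
    ++ List.replicate (fish.countP (fun x => decide (x ≤ 0))) 8

-- ===== PRECONDITION & SPEC =====
def Spec_model_fish (fish : List Int) (out : List Int) : Prop := out = model_fish_alt fish
instance (fish : List Int) (out : List Int) : Decidable (Spec_model_fish fish out) := by unfold Spec_model_fish; infer_instance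

-- ===== CLAIM (what is proved, stated in full; the proofs are below) =====
def Claim_equal_model_fish : Prop := ∀ (fish : List Int), Dom_model_fish fish → Spec_model_fish fish (model_fish fish)

-- ===== LEMMAS AND PROOFS =====
theorem take_succ_set' {a' : Type} (l : List a') (i : Nat) (a : a') (h : i < l.length) :
    (l.set i a).take (i+1) = l.take i ++ [a] := by
  rw [List.set_eq_take_append_cons_drop, if_pos h, List.take_append]
  simp [List.length_take, Nat.min_eq_left (le_of_lt h)]

theorem drop_succ_set' {a' : Type} (l : List a') (i : Nat) (a : a') :
    (l.set i a).drop (i+1) = l.drop (i+1) := by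
  rw [List.drop_set]; simp

-- Loop invariant: from index i, A's loop leaves the processed prefix, maps the
-- remaining elements, and appends one 8 per remaining nonpositive element (the 9s A
-- appends are themselves >0, are mapped to 8, and add nothing to the count).
theorem modelFishLoopA_eq (fish : List Int) (i : Nat) :
    modelFishLoopA fish i
      = fish.take i ++ (fish.drop i).map (fun x => if x > 0 then x - 1 else x + 6)
        ++ List.replicate ((fish.drop i).countP (fun x => decide (x ≤ 0))) 8 := by
  induction fish, i using modelFishLoopA.induct with
  | case1 fish i h x hx ih =>
    rw [modelFishLoopA]
    simp only [h, ↓reduceDIte]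
    rw [ih, take_succ_set' _ _ _ h, drop_succ_set',
      List.drop_eq_getElem_cons h, List.map_cons, List.countP_cons]
    have h1 : (0:Int) < fish[i] := hx
    simp [h1, not_le.mpr h1]
    rfl
  | case2 fish i h x hx ih =>
    rw [modelFishLoopA]
    simp only [h, ↓reduceDIte]
    rw [ih,
      List.take_append_of_le_length (by simp; omega),
      List.drop_append_of_le_length (by simp; omega),
      take_succ_set' _ _ _ h, drop_succ_set',
      List.drop_eq_getElem_cons h, List.map_cons, List.countP_cons,
      List.map_append, List.countP_append]
    have h1 : ¬ (0:Int) < fish[i] := hx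
    have h2 : fish[i] ≤ (0:Int) := by omega
    simp [h1, h2, List.replicate_succ]
    rfl
  | case3 fish i h =>
    rw [modelFishLoopA]
    simp only [h, ↓reduceDIte]
    rw [List.drop_eq_nil_of_le (by omega), List.take_of_length_le (by omega)]
    simp

-- ===== VERDICT (by name: the statement is the Claim_ definition above) =====
theorem model_fish_spec : Claim_equal_model_fish := by
  intro fish _
  show _ = _
  rw [model_fish, modelFishLoopA_eq, model_fish_alt]
  simp
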